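-- pv_equiv track=rewrite | github.com/zhangzihaoDT/business_analysis_auto | comprehensive_city_analysis.py | extract_table_lines
-- ===== SOURCE A (Python) =====
-- from typing import List, Tuple
--
-- def extract_table_lines(lines: List[str], section_prefix: str) -> List[str]:
--     # Find the section header
--     start_idx = None
--     for i, line in enumerate(lines):
--         if line.strip().startswith(section_prefix):
--             start_idx = i
--             break
--     if start_idx is None:
--         return []
--
--     # From next lines, find the first table start (line starting with '|')
--     table_start = None
--     for j in range(start_idx + 1, len(lines)):
--         if lines[j].strip().startswith("|"):
--             table_start = j
--             break
--     if table_start is None: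
--         return []
--
--     # Collect table lines until a non-table line appears
--     table_lines = []
--     for k in range(table_start, len(lines)):
--         s = lines[k].strip()
--         if s.startswith("|"):
--             table_lines.append(s)
--         else:
--             break
--     return table_lines
-- ===== SOURCE B (Python) =====
-- def extract_table_lines(lines, section_prefix):
--     # Single pass with a 3-phase state machine: seek header, seek table, collect.
--     mode = 0  # 0 = seeking header, 1 = seeking table start, 2 = collecting
--     out = []
--     for line in lines:
--         s = line.strip()
--         if mode == 0:
--             if s.startswith(section_prefix):
--                 mode = 1
--         elif mode == 1:
--             if s.startswith("|"):
--                 mode = 2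
--                 out.append(s)
--         else:
--             if s.startswith("|"):
--                 out.append(s)
--             else:
--                 return out
--     return out if mode == 2 else []
-- ===== Notes on version B (the rewrite author's own statement) =====
-- stated objective: simpler
-- what changed: Replaces A's three separate index-based scans (find header, find table start, collect) with one single pass over the lines carrying a 3-phase mode variable and an accumulator.
import Mathlib
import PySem

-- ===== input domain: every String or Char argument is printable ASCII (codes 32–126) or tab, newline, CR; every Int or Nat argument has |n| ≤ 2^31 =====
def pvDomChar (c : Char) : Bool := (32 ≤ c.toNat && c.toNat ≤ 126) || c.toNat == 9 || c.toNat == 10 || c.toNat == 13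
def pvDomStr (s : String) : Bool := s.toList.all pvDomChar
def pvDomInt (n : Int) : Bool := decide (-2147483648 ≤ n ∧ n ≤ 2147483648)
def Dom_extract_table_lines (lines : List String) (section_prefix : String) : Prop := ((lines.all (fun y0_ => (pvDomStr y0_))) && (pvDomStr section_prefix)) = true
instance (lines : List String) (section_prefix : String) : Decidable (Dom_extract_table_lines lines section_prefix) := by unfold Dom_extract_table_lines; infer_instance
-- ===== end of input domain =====

-- B replaces A's three separate scans with one single-pass 3-phase state machine (objective: simpler).


-- ===== PORT A =====
-- Loop 1: find the section header; returns the suffix AFTER the header line (i.e. lines[start_idx+1:]), none if absent.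
def etlFindHeader (lines : List String) (pfx : String) : Option (List String) :=
  match lines with
  | [] => none
  | l :: rest =>
    if PySem.Str.startswith (PySem.Str.strip l) pfx then some rest else etlFindHeader rest pfx

-- Loop 2: find the first table line; returns the suffix starting AT it (lines[table_start:]), none if absent.
def etlFindTable (lines : List String) : Option (List String) :=
  match lines with
  | [] => none
  | l :: rest =>
    if PySem.Str.startswith (PySem.Str.strip l) "|" then some (l :: rest) else etlFindTable rest

-- Loop 3: collect stripped lines while they start with '|', break at the first that does not.
def etlCollect (acc : List String) (lines : List String) : List String :=
  match lines with
  | [] => acc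
  | l :: rest =>
    let s := PySem.Str.strip l
    if PySem.Str.startswith s "|" then etlCollect (acc ++ [s]) rest else acc

def extract_table_lines (lines : List String) (section_prefix : String) : List String :=
  match etlFindHeader lines section_prefix with
  | none => []
  | some afterHdr =>
    match etlFindTable afterHdr with
    | none => []
    | some tbl => etlCollect [] tbl

-- ===== PORT B =====
-- Single pass; mode 0 = seeking header, 1 = seeking table start, 2 = collecting.
def etlAltGo (lines : List String) (pfx : String) (mode : Nat) (out : List String) : List String :=
  match lines with
  | [] => if mode == 2 then out else []
  | l :: rest =>
    let s := PySem.Str.strip l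
    if mode == 0 then
      if PySem.Str.startswith s pfx then etlAltGo rest pfx 1 out else etlAltGo rest pfx 0 out
    else if mode == 1 then
      if PySem.Str.startswith s "|" then etlAltGo rest pfx 2 (out ++ [s]) else etlAltGo rest pfx 1 out
    else
      if PySem.Str.startswith s "|" then etlAltGo rest pfx 2 (out ++ [s]) else out

def extract_table_lines_alt (lines : List String) (section_prefix : String) : List String :=
  etlAltGo lines section_prefix 0 []

-- ===== PRECONDITION & SPEC =====
def Spec_extract_table_lines (lines : List String) (section_prefix : String) (out : List String) : Prop := out = extract_table_lines_alt lines section_prefix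
instance (lines : List String) (section_prefix : String) (out : List String) : Decidable (Spec_extract_table_lines lines section_prefix out) := by unfold Spec_extract_table_lines; infer_instance

-- ===== CLAIM (what is proved, stated in full; the proofs are below) =====
def Claim_equal_extract_table_lines : Prop := ∀ (lines : List String) (section_prefix : String), Dom_extract_table_lines lines section_prefix → Spec_extract_table_lines lines section_prefix (extract_table_lines lines section_prefix)

-- ===== LEMMAS AND PROOFS =====

-- mode-2 phase IS A's collecting loop
theorem etlAltGo_two (lines : List String) (pfx : String) (out : List String) :
    etlAltGo lines pfx 2 out = etlCollect out lines := by
  induction lines generalizing out with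
  | nil => simp [etlAltGo, etlCollect]
  | cons l rest ih =>
    by_cases h : PySem.Chars.startswith (PySem.Chars.strip l.toList) ['|'] = true
    · simp [etlAltGo, etlCollect, h, ih]
    · simp [etlAltGo, etlCollect, h]

-- mode-1 phase matches A's table search followed by collecting
theorem etlAltGo_one (lines : List String) (pfx : String) (out : List String) :
    etlAltGo lines pfx 1 out =
      match etlFindTable lines with
      | none => []
      | some tbl => etlCollect out tbl := by
  induction lines generalizing out with
  | nil => simp [etlAltGo, etlFindTable]
  | cons l rest ih =>
    by_cases h : PySem.Chars.startswith (PySem.Chars.strip l.toList) ['|'] = true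
    · simp [etlAltGo, etlFindTable, etlCollect, h, etlAltGo_two]
    · simp [etlAltGo, etlFindTable, h, ih]

-- mode-0 phase matches A's header search followed by the rest
theorem etlAltGo_zero (lines : List String) (pfx : String) (out : List String) :
    etlAltGo lines pfx 0 out =
      match etlFindHeader lines pfx with
      | none => []
      | some afterHdr => etlAltGo afterHdr pfx 1 out := by
  induction lines generalizing out with
  | nil => simp [etlAltGo, etlFindHeader]
  | cons l rest ih =>
    by_cases h : PySem.Chars.startswith (PySem.Chars.strip l.toList) pfx.toList = true
    · simp [etlAltGo, etlFindHeader, h]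
    · simp [etlAltGo, etlFindHeader, h, ih]

-- ===== VERDICT (by name: the statement is the Claim_ definition above) =====
theorem extract_table_lines_spec : Claim_equal_extract_table_lines := by
  intro lines pfx _
  unfold Spec_extract_table_lines extract_table_lines extract_table_lines_alt
  rw [etlAltGo_zero]
  cases etlFindHeader lines pfx with
  | none => rfl
  | some afterHdr =>
    show (match etlFindTable afterHdr with
      | none => []
      | some tbl => etlCollect [] tbl) = etlAltGo afterHdr pfx 1 []
    rw [etlAltGo_one]
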